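-- pv_equiv track=rewrite | github.com/EkhiAzur/WikipediaNameProblem | predict.py | simplifyData
-- ===== SOURCE A (Python) =====
-- def simplifyData(arg):
--     blackList = ["del","de","la","el","los","i","y"]
--     numList = [str(i) for i in range(len(arg))]
--     result = arg.copy()
--     for i in reversed(range(len(arg)-1)):
--         if arg[i].lower() in blackList:
--             result[i:i+2] = [''.join(result[i:i+2])]
--             numList[i:i+2] = [';'.join(numList[i:i+2])]
--
--     return result, numList
-- ===== SOURCE B (Python) =====
-- def simplifyData(arg):
--     # single left-to-right pass with a pending prefix instead of repeated slice-assignment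
--     blackList = {"del", "de", "la", "el", "los", "i", "y"}
--     result, numList = [], []
--     pw = pn = ""
--     last = len(arg) - 1
--     for i, w in enumerate(arg):
--         if i < last and w.lower() in blackList:
--             pw += w
--             pn += str(i) + ";"
--         else:
--             result.append(pw + w)
--             numList.append(pn + str(i))
--             pw = pn = ""
--     return result, numList
-- ===== Notes on version B (the rewrite author's own statement) =====
-- stated objective: faster
-- what changed: A repeatedly rewrites the list with slice assignments in a right-to-left loop; B makes one left-to-right pass that accumulates a pending merged prefix and appends each finished group once.
import Mathlib
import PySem

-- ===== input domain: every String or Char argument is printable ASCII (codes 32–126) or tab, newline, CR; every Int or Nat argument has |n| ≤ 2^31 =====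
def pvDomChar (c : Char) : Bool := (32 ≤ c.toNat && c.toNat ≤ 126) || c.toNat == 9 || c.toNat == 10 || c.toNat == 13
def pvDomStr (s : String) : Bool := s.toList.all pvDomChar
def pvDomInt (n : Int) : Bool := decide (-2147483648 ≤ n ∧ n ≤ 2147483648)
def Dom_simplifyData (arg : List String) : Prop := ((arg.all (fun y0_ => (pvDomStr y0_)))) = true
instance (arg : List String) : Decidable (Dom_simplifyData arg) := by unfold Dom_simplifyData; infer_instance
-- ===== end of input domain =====

-- B replaces A's right-to-left loop of list slice-assignments by a single left-to-right
-- pass carrying a pending merged prefix (objective: faster).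

-- ===== PORT A =====
def pvBlackList : List String := ["del", "de", "la", "el", "los", "i", "y"]

def simplifyData (arg : List String) : List String × List String :=
  let numList : List String := (PySem.List.pyRange 0 (arg.length : Int) 1).map (fun i => PySem.Int.toStr i)
  ((PySem.List.pyRange 0 ((arg.length : Int) - 1) 1).reverse).foldl
    (fun st i =>
      if PySem.Str.lower (PySem.List.pyGetD arg i "") ∈ pvBlackList then
        (PySem.List.slice st.1 none (some i)
           ++ PySem.Str.join "" (PySem.List.slice st.1 (some i) (some (i + 2)))
              :: PySem.List.slice st.1 (some (i + 2)) none,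
         PySem.List.slice st.2 none (some i)
           ++ PySem.Str.join ";" (PySem.List.slice st.2 (some i) (some (i + 2)))
              :: PySem.List.slice st.2 (some (i + 2)) none)
      else st)
    (arg, numList)

-- ===== PORT B =====
def pvBlackSet : PySem.Set String := PySem.Set.ofList ["del", "de", "la", "el", "los", "i", "y"]

def simplifyData_alt (arg : List String) : List String × List String :=
  let last : Int := (arg.length : Int) - 1
  let st := (PySem.List.enumerate arg 0).foldl
    (fun (st : (List String × List String) × (String × String)) iw =>
      if iw.1 < last ∧ PySem.Str.lower iw.2 ∈ pvBlackSet then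
        (st.1, (st.2.1 ++ iw.2, st.2.2 ++ PySem.Int.toStr iw.1 ++ ";"))
      else
        ((st.1.1 ++ [st.2.1 ++ iw.2], st.1.2 ++ [st.2.2 ++ PySem.Int.toStr iw.1]), ("", "")))
    (([], []), ("", ""))
  (st.1.1, st.1.2)

-- ===== PRECONDITION & SPEC =====
def Spec_simplifyData (arg : List String) (out : List String × List String) : Prop := out = simplifyData_alt arg
instance (arg : List String) (out : List String × List String) : Decidable (Spec_simplifyData arg out) := by unfold Spec_simplifyData; infer_instance

-- ===== CLAIM (what is proved, stated in full; the proofs are below) =====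
def Claim_equal_simplifyData : Prop := ∀ (arg : List String), Dom_simplifyData arg → Spec_simplifyData arg (simplifyData arg)

-- ===== LEMMAS AND PROOFS =====

-- common specification: the merged word groups / index groups of the suffix of the
-- input starting at index i
def grp (i : Int) : List String → List String × List String
  | [] => ([], [])
  | w :: rest =>
    let p := grp (i + 1) rest
    if rest ≠ [] ∧ PySem.Str.lower w ∈ pvBlackList then
      ((w ++ p.1.headD "") :: p.1.tail, (PySem.Int.toStr i ++ ";" ++ p.2.headD "") :: p.2.tail)
    else (w :: p.1, PySem.Int.toStr i :: p.2)

def prepHead (p : String) : List String → List String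
  | [] => []
  | h :: t => (p ++ h) :: t

lemma grp_ne_nil (i : Int) (l : List String) (h : l ≠ []) :
    (grp i l).1 ≠ [] ∧ (grp i l).2 ≠ [] := by
  cases l with
  | nil => exact absurd rfl h
  | cons w rest => simp only [grp]; split <;> simp

lemma join_empty_pair (a b : String) : PySem.Str.join "" [a, b] = a ++ b := by
  apply String.ext
  simp [PySem.Str.join, PySem.Chars.join_cons_cons, PySem.Chars.join_singleton]

lemma join_semi_pair (a b : String) : PySem.Str.join ";" [a, b] = a ++ ";" ++ b := by
  apply String.ext
  simp [PySem.Str.join, PySem.Chars.join_cons_cons, PySem.Chars.join_singleton]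

lemma prepHead_empty (l : List String) : prepHead "" l = l := by
  cases l with
  | nil => rfl
  | cons h t => simp [prepHead, String.empty_append]

-- the initial numList of A, as a function of n
def numsOf (n : Nat) : List String :=
  (PySem.List.pyRange 0 (n : Int) 1).map (fun i => PySem.Int.toStr i)

lemma numsOf_eq (n : Nat) :
    (PySem.List.pyRange 0 (n : Int) 1).map (fun i => PySem.Int.toStr i) = numsOf n := rfl

lemma numsOf_length (n : Nat) : (numsOf n).length = n := by
  simp [numsOf, PySem.List.length_pyRange_one]

lemma numsOf_getElem (n k : Nat) (h : k < n) :
    (numsOf n)[k]'(by simpa [numsOf_length]) = PySem.Int.toStr (k : Int) := by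
  simp [numsOf, PySem.List.getElem_pyRange_one]

lemma grp_cons (i : Int) (w : String) (rest : List String) :
    grp i (w :: rest) =
      if rest ≠ [] ∧ PySem.Str.lower w ∈ pvBlackList then
        ((w ++ (grp (i + 1) rest).1.headD "") :: (grp (i + 1) rest).1.tail,
         (PySem.Int.toStr i ++ ";" ++ (grp (i + 1) rest).2.headD "") :: (grp (i + 1) rest).2.tail)
      else (w :: (grp (i + 1) rest).1, PySem.Int.toStr i :: (grp (i + 1) rest).2) := rfl

lemma take_getElem_cons {α : Type} (l : List α) (k : Nat) (h : k < l.length) :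
    l.take (k + 1) = l.take k ++ [l[k]] := by
  rw [List.take_add_one]; simp [List.getElem?_eq_getElem h]

-- A's loop step
def stepA (arg : List String) (st : List String × List String) (i : Int) : List String × List String :=
  if PySem.Str.lower (PySem.List.pyGetD arg i "") ∈ pvBlackList then
    (PySem.List.slice st.1 none (some i)
       ++ PySem.Str.join "" (PySem.List.slice st.1 (some i) (some (i + 2)))
          :: PySem.List.slice st.1 (some (i + 2)) none,
     PySem.List.slice st.2 none (some i)
       ++ PySem.Str.join ";" (PySem.List.slice st.2 (some i) (some (i + 2)))
          :: PySem.List.slice st.2 (some (i + 2)) none)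
  else st

lemma simplifyData_eq_foldA (arg : List String) :
    simplifyData arg =
      ((PySem.List.pyRange 0 ((arg.length : Int) - 1) 1).reverse).foldl (stepA arg)
        (arg, numsOf arg.length) := by
  rw [simplifyData, numsOf_eq]
  rfl

-- slice arithmetic on a state of shape (prefix of length k+1) ++ suffix
lemma slice_pre (pre suf : List String) (k : Nat) (hpre : pre.length = k + 1) :
    PySem.List.slice (pre ++ suf) none (some (k : Int)) = pre.take k := by
  rw [PySem.List.slice_to_natCast, List.take_append_of_le_length (by omega)]

lemma slice_mid (pre suf : List String) (k : Nat) (hpre : pre.length = k + 1) :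
    PySem.List.slice (pre ++ suf) (some (k : Int)) (some ((k : Int) + 2))
      = pre.drop k ++ suf.take 1 := by
  have h2 : (k : Int) + 2 = ((k + 2 : Nat) : Int) := by push_cast; ring
  rw [h2, PySem.List.slice_natCast, List.drop_append_of_le_length (by omega)]
  have h3 : k + 2 - k = 2 := by omega
  rw [h3]
  obtain ⟨x, hx⟩ := List.length_eq_one_iff.mp (show (pre.drop k).length = 1 by simp [hpre])
  rw [hx]; simp

lemma slice_post (pre suf : List String) (k : Nat) (hpre : pre.length = k + 1) :
    PySem.List.slice (pre ++ suf) (some ((k : Int) + 2)) none = suf.drop 1 := by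
  have h2 : (k : Int) + 2 = ((k + 2 : Nat) : Int) := by push_cast; ring
  rw [h2, PySem.List.slice_from_natCast, List.drop_append]
  simp [hpre]

-- invariant of A's loop: after processing all indices ≥ k, the state is the untouched
-- prefix of length k followed by the merged groups of the suffix starting at k
lemma foldA_inv (arg : List String) :
    ∀ (m k : Nat), arg.length - 1 = k + m →
      ((PySem.List.pyRange (k : Int) ((arg.length : Int) - 1) 1).reverse).foldl (stepA arg)
          (arg, numsOf arg.length)
        = (arg.take k ++ (grp (k : Int) (arg.drop k)).1,
           (numsOf arg.length).take k ++ (grp (k : Int) (arg.drop k)).2) := by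
  intro m
  induction m with
  | zero =>
    intro k hk
    rw [PySem.List.pyRange_one_eq_nil (by omega)]
    simp only [List.reverse_nil, List.foldl_nil]
    rcases Nat.eq_zero_or_pos arg.length with h0 | hpos
    · have hk0 : k = 0 := by omega
      subst hk0
      have : arg = [] := List.length_eq_zero_iff.mp h0
      subst this
      simp [grp, numsOf]
    · have hklt : k < arg.length := by omega
      have hdrop2 : arg.drop (k + 1) = [] := by
        apply List.eq_nil_of_length_eq_zero
        simp; omega
      have hdrop : arg.drop k = [arg[k]] := by
        rw [List.drop_eq_getElem_cons hklt, hdrop2]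
      rw [hdrop]
      simp only [grp]
      rw [if_neg (by simp), Prod.mk.injEq]
      constructor
      · conv_lhs => rw [← List.take_append_drop (k + 1) arg,
          take_getElem_cons arg k hklt, hdrop2, List.append_nil]
      · conv_lhs => rw [← List.take_append_drop (k + 1) (numsOf arg.length)]
        have hkn : k < (numsOf arg.length).length := by rw [numsOf_length]; omega
        rw [take_getElem_cons (numsOf arg.length) k hkn]
        have hd2 : (numsOf arg.length).drop (k + 1) = [] := by
          apply List.eq_nil_of_length_eq_zero
          simp [numsOf_length]; omega
        rw [hd2, List.append_nil, numsOf_getElem _ _ (by omega)]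
  | succ m ih =>
    intro k hk
    have hlt : (k : Int) < (arg.length : Int) - 1 := by omega
    rw [PySem.List.pyRange_one_cons hlt]
    simp only [List.reverse_cons, List.foldl_append, List.foldl_cons, List.foldl_nil]
    have hk1 : ((k : Int) + 1) = ((k + 1 : Nat) : Int) := by push_cast; ring
    rw [hk1, ih (k + 1) (by omega)]
    have hklt : k < arg.length := by omega
    have hrest : arg.drop (k + 1) ≠ [] := by
      intro h
      have := congrArg List.length h
      simp at this
      omega
    have hdropk : arg.drop k = arg[k] :: arg.drop (k + 1) := List.drop_eq_getElem_cons hklt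
    have hget : PySem.List.pyGetD arg (k : Int) "" = arg[k] := by
      rw [PySem.List.pyGetD_natCast]
      exact List.getD_eq_getElem arg "" hklt
    obtain ⟨h1, t1, hg1⟩ := List.exists_cons_of_ne_nil (grp_ne_nil _ _ hrest).1
    obtain ⟨h2, t2, hg2⟩ := List.exists_cons_of_ne_nil (grp_ne_nil _ _ hrest).2
    have hlen1 : (arg.take (k + 1)).length = k + 1 := by simp; omega
    have hlen2 : ((numsOf arg.length).take (k + 1)).length = k + 1 := by
      simp [numsOf_length]; omega
    have hkn : k < (numsOf arg.length).length := by rw [numsOf_length]; omega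
    have hdropk1 : (arg.take (k + 1)).drop k = [arg[k]] := by
      rw [take_getElem_cons arg k hklt, List.drop_append_of_le_length (by simp; omega)]
      simp [List.drop_of_length_le, List.length_take]
    have hdropk2 : ((numsOf arg.length).take (k + 1)).drop k = [PySem.Int.toStr (k : Int)] := by
      rw [take_getElem_cons (numsOf arg.length) k hkn,
        List.drop_append_of_le_length (by simp [numsOf_length]; omega)]
      rw [numsOf_getElem _ _ (by omega)]
      simp [List.drop_of_length_le, List.length_take, numsOf_length]
    rw [hdropk]
    simp only [grp, hk1]
    by_cases hmem : PySem.Str.lower arg[k] ∈ pvBlackList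
    · rw [if_pos ⟨hrest, hmem⟩]
      simp only [stepA, hget]
      rw [if_pos hmem]
      rw [slice_pre _ _ _ hlen1, slice_mid _ _ _ hlen1, slice_post _ _ _ hlen1,
        slice_pre _ _ _ hlen2, slice_mid _ _ _ hlen2, slice_post _ _ _ hlen2,
        hdropk1, hdropk2, hg1, hg2]
      rw [Prod.mk.injEq]
      constructor
      · simp [join_empty_pair, List.take_take]
      · simp [join_semi_pair, List.take_take]
    · rw [if_neg (by intro hc; exact hmem hc.2)]
      simp only [stepA, hget]
      rw [if_neg hmem, Prod.mk.injEq]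
      constructor
      · rw [take_getElem_cons arg k hklt, List.append_assoc]; rfl
      · rw [take_getElem_cons (numsOf arg.length) k hkn, numsOf_getElem _ _ (by omega),
          List.append_assoc]
        rfl

-- B's loop step
def stepB (last : Int) (st : (List String × List String) × (String × String))
    (iw : Int × String) : (List String × List String) × (String × String) :=
  if iw.1 < last ∧ PySem.Str.lower iw.2 ∈ pvBlackSet then
    (st.1, (st.2.1 ++ iw.2, st.2.2 ++ PySem.Int.toStr iw.1 ++ ";"))
  else
    ((st.1.1 ++ [st.2.1 ++ iw.2], st.1.2 ++ [st.2.2 ++ PySem.Int.toStr iw.1]), ("", ""))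

lemma mem_pvBlackSet (w : String) : w ∈ pvBlackSet ↔ w ∈ pvBlackList := by
  rw [pvBlackSet, PySem.Set.mem_ofList]; rfl

-- invariant of B's loop over a non-empty suffix starting at index i
lemma foldB_inv (n : Nat) :
    ∀ (l : List String) (i : Nat), l ≠ [] → i + l.length = n →
    ∀ (a1 a2 : List String) (pw pn : String),
      (PySem.List.enumerate l (i : Int)).foldl (stepB ((n : Int) - 1)) ((a1, a2), (pw, pn))
        = ((a1 ++ prepHead pw (grp (i : Int) l).1, a2 ++ prepHead pn (grp (i : Int) l).2),
           ("", "")) := by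
  intro l
  induction l with
  | nil => intro i h; exact absurd rfl h
  | cons w rest ih =>
    intro i _ hlen a1 a2 pw pn
    rw [PySem.List.enumerate_cons, List.foldl_cons]
    cases rest with
    | nil =>
      have hn : n = i + 1 := by simpa using hlen.symm
      have hnotlt : ¬ ((i : Int) < (n : Int) - 1) := by omega
      rw [show stepB ((n : Int) - 1) ((a1, a2), (pw, pn)) ((i : Int), w)
          = ((a1 ++ [pw ++ w], a2 ++ [pn ++ PySem.Int.toStr (i : Int)]), ("", "")) from by
        simp only [stepB]
        rw [if_neg (by intro hc; exact hnotlt hc.1)]]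
      rw [PySem.List.enumerate_nil, List.foldl_nil]
      simp [grp, prepHead]
    | cons w2 rest2 =>
      have hlt : (i : Int) < (n : Int) - 1 := by
        simp at hlen; omega
      have hk1 : ((i : Int) + 1) = ((i + 1 : Nat) : Int) := by push_cast; ring
      have hrest : w2 :: rest2 ≠ [] := by simp
      obtain ⟨h1, t1, hg1⟩ := List.exists_cons_of_ne_nil (grp_ne_nil ((i + 1 : Nat) : Int) _ hrest).1
      obtain ⟨h2, t2, hg2⟩ := List.exists_cons_of_ne_nil (grp_ne_nil ((i + 1 : Nat) : Int) _ hrest).2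
      by_cases hmem : PySem.Str.lower w ∈ pvBlackList
      · rw [show stepB ((n : Int) - 1) ((a1, a2), (pw, pn)) ((i : Int), w)
            = ((a1, a2), (pw ++ w, pn ++ PySem.Int.toStr (i : Int) ++ ";")) from by
          simp only [stepB]
          rw [if_pos ⟨hlt, (mem_pvBlackSet _).mpr hmem⟩]]
        rw [hk1, ih (i + 1) hrest (by simp at hlen ⊢; omega)]
        conv_rhs => rw [grp_cons]
        rw [if_pos ⟨hrest, hmem⟩, hk1, hg1, hg2]
        simp [prepHead, String.append_assoc]
      · rw [show stepB ((n : Int) - 1) ((a1, a2), (pw, pn)) ((i : Int), w)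
            = ((a1 ++ [pw ++ w], a2 ++ [pn ++ PySem.Int.toStr (i : Int)]), ("", "")) from by
          simp only [stepB]
          rw [if_neg (by intro hc; exact hmem ((mem_pvBlackSet _).mp hc.2))]]
        rw [hk1, ih (i + 1) hrest (by simp at hlen ⊢; omega)]
        conv_rhs => rw [grp_cons]
        rw [if_neg (by intro hc; exact hmem hc.2), hk1, hg1, hg2]
        simp [prepHead]

lemma simplifyData_alt_eq_grp (arg : List String) :
    simplifyData_alt arg = grp 0 arg := by
  have hdef : simplifyData_alt arg
      = (((PySem.List.enumerate arg 0).foldl (stepB ((arg.length : Int) - 1))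
            (([], []), ("", ""))).1.1,
         ((PySem.List.enumerate arg 0).foldl (stepB ((arg.length : Int) - 1))
            (([], []), ("", ""))).1.2) := rfl
  cases harg : arg with
  | nil => rfl
  | cons w rest =>
    rw [← harg, hdef]
    have h := foldB_inv arg.length arg 0 (by simp [harg]) (by simp) [] [] "" ""
    simp only [Nat.cast_zero, List.nil_append, prepHead_empty] at h
    rw [h]

-- ===== VERDICT (by name: the statement is the Claim_ definition above) =====
theorem simplifyData_spec : Claim_equal_simplifyData := by
  intro arg _
  unfold Spec_simplifyData
  rw [simplifyData_eq_foldA, simplifyData_alt_eq_grp]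
  have h := foldA_inv arg (arg.length - 1) 0 (by omega)
  simp only [Nat.cast_zero, List.take_zero, List.drop_zero, List.nil_append] at h
  rw [h]
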